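-- pv_equiv track=rewrite | github.com/lalapopa/bachelor-degree | code/aerodynamics_data.py | _take_range
-- ===== SOURCE A (Python) =====
-- def _take_range(H):
--     H_text = [0, 2, 4, 6, 8, 10, 11]
--     H_val = [val * 1000 for val in H_text]
--     if H >= H_val[-1]:
--         return (H_text[-2], H_text[-1])
--     if H <= H_val[0]:
--         return (H_text[0], H_text[1])
--     for i, val in enumerate(H_val):
--         if val > H:
--             return (H_text[i - 1], H_text[i])
-- ===== SOURCE B (Python) =====
-- def _take_range(H):
--     H_text = [0, 2, 4, 6, 8, 10, 11]
--     if H >= 11000: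
--         return (10, 11)
--     if H <= 0:
--         return (0, 2)
--     # binary search (bisect_right by hand): first index with H_text[i]*1000 > H
--     lo, hi = 0, len(H_text)
--     while lo < hi:
--         mid = (lo + hi) // 2
--         if H_text[mid] * 1000 <= H:
--             lo = mid + 1
--         else:
--             hi = mid
--     return (H_text[lo - 1], H_text[lo])
-- ===== Notes on version B (the rewrite author's own statement) =====
-- stated objective: alternative
-- what changed: The linear first-value-greater scan over the enumerated altitude table is replaced by a hand-written binary search (bisect_right semantics) over the same fixed table; the two edge guards stay as inlined constants.
import Mathlib
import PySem

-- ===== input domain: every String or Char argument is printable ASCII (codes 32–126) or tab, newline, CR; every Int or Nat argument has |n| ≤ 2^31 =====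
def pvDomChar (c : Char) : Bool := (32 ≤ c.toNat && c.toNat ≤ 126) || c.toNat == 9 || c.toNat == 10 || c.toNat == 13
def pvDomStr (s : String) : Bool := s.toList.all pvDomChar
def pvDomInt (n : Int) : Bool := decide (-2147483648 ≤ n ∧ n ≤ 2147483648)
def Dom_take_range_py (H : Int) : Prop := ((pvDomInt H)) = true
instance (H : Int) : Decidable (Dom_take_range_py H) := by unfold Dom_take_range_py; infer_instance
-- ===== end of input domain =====

-- B replaces the linear first-greater scan over the fixed altitude table by a hand-written
-- binary search (bisect_right semantics) over the same table (alternative decomposition).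

-- ===== PORT A =====
-- the fixed tables from A
def pvHText : List Int := [0, 2, 4, 6, 8, 10, 11]
def pvHVal : List Int := pvHText.map (· * 1000)

-- the 'for i, val in enumerate(H_val)' loop; none = loop fell through (Python returns None there,
-- unreachable under A's guards)
def pvLoopA (H : Int) : List (Int × Int) → Option (Int × Int)
  | [] => none
  | (i, val) :: rest =>
    if val > H then
      some (((PySem.List.pyGet? pvHText (i - 1)).getD 0), ((PySem.List.pyGet? pvHText i).getD 0))
    else pvLoopA H rest

def take_range_py (H : Int) : Int × Int :=
  if H ≥ (PySem.List.pyGet? pvHVal (-1)).getD 0 then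
    ((PySem.List.pyGet? pvHText (-2)).getD 0, (PySem.List.pyGet? pvHText (-1)).getD 0)
  else if H ≤ (PySem.List.pyGet? pvHVal 0).getD 0 then
    ((PySem.List.pyGet? pvHText 0).getD 0, (PySem.List.pyGet? pvHText 1).getD 0)
  else
    -- the guards make the scan always fire (11000 > H); the .getD defaults are never used
    (pvLoopA H (PySem.List.enumerate pvHVal)).getD (0, 0)

-- ===== PORT B =====
-- B's while-loop binary search: first index lo with pvHText[lo]*1000 > H
def pvLoopB (H : Int) (lo hi : Nat) : Nat :=
  if lo < hi then
    let mid := (lo + hi) / 2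
    if pvHText.getD mid 0 * 1000 ≤ H then pvLoopB H (mid + 1) hi else pvLoopB H lo mid
  else lo
termination_by hi - lo

def take_range_py_alt (H : Int) : Int × Int :=
  if H ≥ 11000 then (10, 11)
  else if H ≤ 0 then (0, 2)
  else
    let lo := pvLoopB H 0 pvHText.length
    (pvHText.getD (lo - 1) 0, pvHText.getD lo 0)

-- ===== PRECONDITION & SPEC =====
def Spec_take_range_py (H : Int) (out : Int × Int) : Prop := out = take_range_py_alt H
instance (H : Int) (out : Int × Int) : Decidable (Spec_take_range_py H out) := by unfold Spec_take_range_py; infer_instance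

-- ===== CLAIM (what is proved, stated in full; the proofs are below) =====
def Claim_equal_take_range_py : Prop := ∀ (H : Int), Dom_take_range_py H → Spec_take_range_py H (take_range_py H)

-- ===== LEMMAS AND PROOFS =====

theorem pvEnumVal : PySem.List.enumerate pvHVal =
    [(0, 0), (1, 2000), (2, 4000), (3, 6000), (4, 8000), (5, 10000), (6, 11000)] := by decide

theorem pvLoopB1 (H : Int) (h0 : 0 < H) (h1 : H < 2000) : pvLoopB H 0 7 = 1 := by
  rw [pvLoopB]; norm_num [pvHText]
  rw [if_neg (by omega), pvLoopB]; norm_num [pvHText]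
  rw [if_neg (by omega), pvLoopB]; norm_num [pvHText]
  rw [if_pos (by omega), pvLoopB]; norm_num

theorem pvLoopB2 (H : Int) (h0 : 2000 ≤ H) (h1 : H < 4000) : pvLoopB H 0 7 = 2 := by
  rw [pvLoopB]; norm_num [pvHText]
  rw [if_neg (by omega), pvLoopB]; norm_num [pvHText]
  rw [if_pos (by omega), pvLoopB]; norm_num [pvHText]
  rw [if_neg (by omega), pvLoopB]; norm_num

theorem pvLoopB3 (H : Int) (h0 : 4000 ≤ H) (h1 : H < 6000) : pvLoopB H 0 7 = 3 := by
  rw [pvLoopB]; norm_num [pvHText]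
  rw [if_neg (by omega), pvLoopB]; norm_num [pvHText]
  rw [if_pos (by omega), pvLoopB]; norm_num [pvHText]
  rw [if_pos (by omega), pvLoopB]; norm_num

theorem pvLoopB4 (H : Int) (h0 : 6000 ≤ H) (h1 : H < 8000) : pvLoopB H 0 7 = 4 := by
  rw [pvLoopB]; norm_num [pvHText]
  rw [if_pos (by omega), pvLoopB]; norm_num [pvHText]
  rw [if_neg (by omega), pvLoopB]; norm_num [pvHText]
  rw [if_neg (by omega), pvLoopB]; norm_num

theorem pvLoopB5 (H : Int) (h0 : 8000 ≤ H) (h1 : H < 10000) : pvLoopB H 0 7 = 5 := by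
  rw [pvLoopB]; norm_num [pvHText]
  rw [if_pos (by omega), pvLoopB]; norm_num [pvHText]
  rw [if_neg (by omega), pvLoopB]; norm_num [pvHText]
  rw [if_pos (by omega), pvLoopB]; norm_num

theorem pvLoopB6 (H : Int) (h0 : 10000 ≤ H) (h1 : H < 11000) : pvLoopB H 0 7 = 6 := by
  rw [pvLoopB]; norm_num [pvHText]
  rw [if_pos (by omega), pvLoopB]; norm_num [pvHText]
  rw [if_pos (by omega), pvLoopB]; norm_num [pvHText]
  rw [if_neg (by omega), pvLoopB]; norm_num

-- ===== VERDICT (by name: the statement is the Claim_ definition above) =====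
theorem take_range_py_spec : Claim_equal_take_range_py := by
  intro H _
  unfold Spec_take_range_py take_range_py take_range_py_alt
  have g1 : (PySem.List.pyGet? pvHVal (-1)).getD 0 = 11000 := by decide
  have g0 : (PySem.List.pyGet? pvHVal 0).getD 0 = 0 := by decide
  rw [g1, g0, pvEnumVal]
  by_cases h11 : H ≥ 11000
  · rw [if_pos h11, if_pos h11]; decide
  rw [if_neg h11, if_neg h11]
  by_cases h0 : H ≤ 0
  · rw [if_pos h0, if_pos h0]; decide
  rw [if_neg h0, if_neg h0]
  show _ = (pvHText.getD (pvLoopB H 0 pvHText.length - 1) 0, pvHText.getD (pvLoopB H 0 pvHText.length) 0)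
  have hl : pvHText.length = 7 := by decide
  rw [hl]
  by_cases c1 : H < 2000
  · rw [pvLoopB1 H (by omega) c1]
    simp only [pvLoopA]
    rw [if_neg (by omega), if_pos (by omega)]; decide
  by_cases c2 : H < 4000
  · rw [pvLoopB2 H (by omega) c2]
    simp only [pvLoopA]
    rw [if_neg (by omega), if_neg (by omega), if_pos (by omega)]; decide
  by_cases c3 : H < 6000
  · rw [pvLoopB3 H (by omega) c3]
    simp only [pvLoopA]
    rw [if_neg (by omega), if_neg (by omega), if_neg (by omega), if_pos (by omega)]; decide
  by_cases c4 : H < 8000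
  · rw [pvLoopB4 H (by omega) c4]
    simp only [pvLoopA]
    rw [if_neg (by omega), if_neg (by omega), if_neg (by omega), if_neg (by omega),
      if_pos (by omega)]; decide
  by_cases c5 : H < 10000
  · rw [pvLoopB5 H (by omega) c5]
    simp only [pvLoopA]
    rw [if_neg (by omega), if_neg (by omega), if_neg (by omega), if_neg (by omega),
      if_neg (by omega), if_pos (by omega)]; decide
  · rw [pvLoopB6 H (by omega) (by omega)]
    simp only [pvLoopA]
    rw [if_neg (by omega), if_neg (by omega), if_neg (by omega), if_neg (by omega),
      if_neg (by omega), if_neg (by omega), if_pos (by omega)]; decide
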